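-- pv_equiv track=rewrite | github.com/Prasanna-kumar018/Leetcode | 3296-minimum-time-to-revert-word-to-initial-state-ii/minimum-time-to-revert-word-to-initial-state-ii.py | minimumTimeToInitialState
-- ===== SOURCE A (Python) =====
-- def minimumTimeToInitialState(word: str, k: int) -> int:
--     n = len(word)
--     count = 0
--     hash = 0
--     d = 26
--     MOD = 10**12+7
--     arr = []
--     for x in word:
--         x = ord(x)
--         hash = (hash*d) + x
--         hash %= MOD
--         arr.append(hash)
--     i = 0
--
--     def get(x,y):
--         a = y-x+1
--         aa = pow(d,a,MOD)
--         return ((arr[y]-((arr[x-1] if x-1>=0 else 0)*aa)%MOD)) % MOD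
--     while i+k<n:
--         count += 1
--         L = n-(i+k)
--         start = get(0,L-1)
--         w = get(i+k,n-1)
--         if start == w:
--             return count
--         i+=k
--     count+=1
--     return count
-- ===== SOURCE B (Python) =====
-- def minimumTimeToInitialState(word: str, k: int) -> int:
--     # Per-shift direct rehash: no prefix-hash array, no O(1) modular segment
--     # extraction -- for each shift s = step*k just hash the prefix and the
--     # shifted suffix from scratch and compare.
--     n = len(word)
--     MOD = 10 ** 12 + 7
--
--     def h(s):
--         v = 0
--         for c in s:
--             v = (v * 26 + ord(c)) % MOD
--         return v
--
--     step = 0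
--     while True:
--         step += 1
--         s = step * k
--         if s >= n:
--             return step
--         if h(word[:n - s]) == h(word[s:]):
--             return step
-- ===== Notes on version B (the rewrite author's own statement) =====
-- stated objective: simpler
-- what changed: Replaced the precomputed rolling-hash prefix array with its O(1) modular segment extraction (pow + subtraction with a nested get helper) by a direct per-shift rehash: at each candidate shift s = step*k the prefix word[:n-s] and the suffix word[s:] are hashed from scratch and compared, so the array, the pow call and the modular-subtraction algebra disappear.
import Mathlib
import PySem

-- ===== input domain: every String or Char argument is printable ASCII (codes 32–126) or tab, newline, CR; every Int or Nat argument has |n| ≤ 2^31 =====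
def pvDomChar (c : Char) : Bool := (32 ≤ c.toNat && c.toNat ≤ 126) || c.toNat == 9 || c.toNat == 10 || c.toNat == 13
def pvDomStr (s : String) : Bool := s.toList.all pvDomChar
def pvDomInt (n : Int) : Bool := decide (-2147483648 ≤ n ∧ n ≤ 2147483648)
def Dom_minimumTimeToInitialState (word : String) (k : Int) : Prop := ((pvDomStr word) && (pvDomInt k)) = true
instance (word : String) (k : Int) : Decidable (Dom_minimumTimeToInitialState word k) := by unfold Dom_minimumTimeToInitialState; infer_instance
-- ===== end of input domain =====

-- B drops A's precomputed prefix-hash array and O(1) modular segment extraction (pow + subtraction):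
-- at each candidate shift it simply re-hashes the prefix and the shifted suffix from scratch (simpler, not faster).

-- ===== PORT A =====
-- A: build the rolling-hash prefix array `arr`, then extract segment hashes with `get` (modular subtraction + pow).
def pvMOD : Int := 10 ^ 12 + 7

-- the `for x in word:` loop accumulating `hash` and `arr`
def pvBuildA : List Char → Int → List Int → Int × List Int
  | [], h, arr => (h, arr)
  | c :: cs, h, arr =>
      let h' := PySem.Int.mod (h * 26 + (c.toNat : Int)) pvMOD
      pvBuildA cs h' (arr ++ [h'])

-- the nested helper `get(x, y)`; `arr[y]` / `arr[x-1]` ported with pyGetD 0: under Pre_ (0 ≤ k)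
-- every index is in range, so the default is never read (Pre_ excludes the k < 0 IndexError inputs).
def pvGetA (arr : List Int) (x y : Int) : Int :=
  let a := y - x + 1
  let aa := PySem.Int.powMod 26 a.toNat pvMOD
  PySem.Int.mod
    (PySem.List.pyGetD arr y 0 -
      PySem.Int.mod ((if x - 1 ≥ 0 then PySem.List.pyGetD arr (x - 1) 0 else 0) * aa) pvMOD)
    pvMOD

-- the `while i+k < n:` loop; fuel only makes the recursion total (n+1 steps always suffice under Pre_)
def pvLoopA (arr : List Int) (n k : Int) : Nat → Int → Int → Int
  | 0, _, count => count
  | fuel + 1, i, count =>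
      if i + k < n then
        let count := count + 1
        let L := n - (i + k)
        let start := pvGetA arr 0 (L - 1)
        let w := pvGetA arr (i + k) (n - 1)
        if start = w then count
        else pvLoopA arr n k fuel (i + k) count
      else count + 1

def minimumTimeToInitialState (word : String) (k : Int) : Int :=
  let n : Int := PySem.Str.len word
  let arr := (pvBuildA word.toList 0 []).2
  pvLoopA arr n k (word.toList.length + 1) 0 0

-- ===== PORT B =====
-- B: no prefix array — at each shift s = step*k hash word[:n-s] and word[s:] directly and compare.
def pvHashB (l : List Char) : Int :=
  l.foldl (fun v c => PySem.Int.mod (v * 26 + (c.toNat : Int)) (10 ^ 12 + 7)) 0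

-- the `while True:` loop; fuel only makes the recursion total (n+1 steps always suffice under Pre_)
def pvLoopB (wl : List Char) (n k : Int) : Nat → Int → Int
  | 0, step => step
  | fuel + 1, step =>
      let step := step + 1
      let s := step * k
      if n ≤ s then step
      else if pvHashB (PySem.List.slice wl none (some (n - s))) =
              pvHashB (PySem.List.slice wl (some s) none) then step
      else pvLoopB wl n k fuel step

def minimumTimeToInitialState_alt (word : String) (k : Int) : Int :=
  pvLoopB word.toList (PySem.Str.len word) k (word.toList.length + 1) 0

-- ===== PRECONDITION & SPEC =====
-- Pre_ excludes exactly k < 0, where A raises IndexError (arr[L-1] with L > n).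
def Pre_minimumTimeToInitialState (word : String) (k : Int) : Prop := 0 ≤ k
instance (word : String) (k : Int) : Decidable (Pre_minimumTimeToInitialState word k) := by
  unfold Pre_minimumTimeToInitialState; infer_instance
def pvWitness_minimumTimeToInitialState : String × Int := ("abacaba", 3)
def Spec_minimumTimeToInitialState (word : String) (k : Int) (out : Int) : Prop := out = minimumTimeToInitialState_alt word k
instance (word : String) (k : Int) (out : Int) : Decidable (Spec_minimumTimeToInitialState word k out) := by unfold Spec_minimumTimeToInitialState; infer_instance

-- ===== CLAIM (what is proved, stated in full; the proofs are below) =====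
def Claim_equal_minimumTimeToInitialState : Prop := ∀ (word : String) (k : Int), Dom_minimumTimeToInitialState word k → Pre_minimumTimeToInitialState word k → Spec_minimumTimeToInitialState word k (minimumTimeToInitialState word k)

-- ===== LEMMAS AND PROOFS =====

-- the shared hash-step function and the running hash H(h, l)
def pvStep (v : Int) (c : Char) : Int := PySem.Int.mod (v * 26 + (c.toNat : Int)) pvMOD

def pvH (h : Int) (l : List Char) : Int := l.foldl pvStep h

-- the list of prefix hashes that A's build loop appends
def pvPref : Int → List Char → List Int
  | _, [] => []
  | h, c :: cs => pvStep h c :: pvPref (pvStep h c) cs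

theorem pvMOD_pos : (0 : Int) < pvMOD := by norm_num [pvMOD]

theorem pvStep_eq (v : Int) (c : Char) : pvStep v c = (v * 26 + (c.toNat : Int)) % pvMOD := by
  simp [pvStep, PySem.Int.mod_eq_emod_of_pos pvMOD_pos]

theorem pvBuildA_snd (cs : List Char) (h : Int) (arr : List Int) :
    (pvBuildA cs h arr).2 = arr ++ pvPref h cs := by
  induction cs generalizing h arr with
  | nil => simp [pvBuildA, pvPref]
  | cons c cs ih => simp [pvBuildA, pvPref, ih, pvStep]

theorem pvPref_length (h : Int) (cs : List Char) : (pvPref h cs).length = cs.length := by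
  induction cs generalizing h with
  | nil => rfl
  | cons c cs ih => simp [pvPref, ih]

theorem pvPref_getElem? (cs : List Char) (h : Int) (j : Nat) (hj : j < cs.length) :
    (pvPref h cs)[j]? = some (pvH h (cs.take (j + 1))) := by
  induction cs generalizing h j with
  | nil => simp at hj
  | cons c cs ih =>
    cases j with
    | zero => simp [pvPref, pvH]
    | succ j => simpa [pvPref, pvH] using ih (pvStep h c) j (by simpa using hj)

theorem pvH_range (cs : List Char) (h : Int) (h0 : 0 ≤ h) (h1 : h < pvMOD) :
    0 ≤ pvH h cs ∧ pvH h cs < pvMOD := by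
  induction cs generalizing h with
  | nil => exact ⟨h0, h1⟩
  | cons c cs ih =>
    exact ih (pvStep h c) (by rw [pvStep_eq]; exact Int.emod_nonneg _ (by have := pvMOD_pos; omega))
      (by rw [pvStep_eq]; exact Int.emod_lt_of_pos _ pvMOD_pos)

theorem pvH_modeq (cs : List Char) (h : Int) :
    pvH h cs ≡ h * 26 ^ cs.length + pvH 0 cs [ZMOD pvMOD] := by
  induction cs generalizing h with
  | nil => simp [pvH]
  | cons c cs ih =>
    have hstep : ∀ v : Int, pvStep v c ≡ v * 26 + (c.toNat : Int) [ZMOD pvMOD] := by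
      intro v; rw [pvStep_eq]; exact Int.emod_emod_of_dvd _ dvd_rfl
    have h1 : pvH h (c :: cs) ≡ (h * 26 + (c.toNat : Int)) * 26 ^ cs.length + pvH 0 cs [ZMOD pvMOD] := by
      have := (ih (pvStep h c)).trans (((hstep h).mul_right (26 ^ cs.length)).add_right _)
      simpa [pvH] using this
    have h2 : pvH 0 (c :: cs) ≡ (0 * 26 + (c.toNat : Int)) * 26 ^ cs.length + pvH 0 cs [ZMOD pvMOD] := by
      have := (ih (pvStep 0 c)).trans (((hstep 0).mul_right (26 ^ cs.length)).add_right _)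
      simpa [pvH] using this
    calc pvH h (c :: cs) ≡ (h * 26 + (c.toNat : Int)) * 26 ^ cs.length + pvH 0 cs [ZMOD pvMOD] := h1
      _ = h * 26 ^ (cs.length + 1) + ((0 * 26 + (c.toNat : Int)) * 26 ^ cs.length + pvH 0 cs) := by ring
      _ ≡ h * 26 ^ (cs.length + 1) + pvH 0 (c :: cs) [ZMOD pvMOD] := (h2.symm.add_left _)
      _ = h * 26 ^ (c :: cs).length + pvH 0 (c :: cs) := by simp

theorem pvArr_getD (wl : List Char) (j : Nat) (hj : j < wl.length) :
    PySem.List.pyGetD (pvPref 0 wl) (j : Int) 0 = pvH 0 (wl.take (j + 1)) := by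
  have hlen : j < (pvPref 0 wl).length := by rw [pvPref_length]; exact hj
  rw [PySem.List.pyGetD_eq_getElem _ 0 (by exact_mod_cast Int.natCast_nonneg j) (by exact_mod_cast hlen)]
  have h2 := pvPref_getElem? wl 0 j hj
  rw [List.getElem?_eq_getElem hlen] at h2
  simpa using Option.some.inj h2

theorem pvH_mod_self (l : List Char) : pvH 0 l % pvMOD = pvH 0 l :=
  Int.emod_eq_of_lt (pvH_range l 0 le_rfl pvMOD_pos).1 (pvH_range l 0 le_rfl pvMOD_pos).2

-- A's `get(0, L-1)` agrees with a direct hash of the prefix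
theorem pvGetA_prefix (wl : List Char) (y : Int) (hy0 : 0 ≤ y) (hy : y < wl.length) :
    pvGetA (pvPref 0 wl) 0 y = pvH 0 (wl.take (y.toNat + 1)) := by
  have hy' : y = (y.toNat : Int) := (Int.toNat_of_nonneg hy0).symm
  have hyn : y.toNat < wl.length := by omega
  simp only [pvGetA]
  rw [if_neg (by norm_num)]
  rw [hy', pvArr_getD wl y.toNat hyn]
  rw [PySem.Int.mod_eq_emod_of_pos pvMOD_pos, PySem.Int.mod_eq_emod_of_pos pvMOD_pos]
  simp only [zero_mul, Int.zero_emod, sub_zero, Int.toNat_natCast, pvH_mod_self]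

-- A's `get(i+k, n-1)` agrees with a direct hash of the shifted suffix
theorem pvGetA_suffix (wl : List Char) (s : Int) (hs0 : 0 ≤ s) (hs : s < wl.length) :
    pvGetA (pvPref 0 wl) s ((wl.length : Int) - 1) = pvH 0 (wl.drop s.toNat) := by
  have hlen : 0 < wl.length := by omega
  by_cases h0 : s = 0
  · subst h0
    simp only [pvGetA]
    rw [if_neg (by norm_num)]
    have h1 : ((wl.length : Int) - 1) = ((wl.length - 1 : Nat) : Int) := by omega
    rw [h1, pvArr_getD wl (wl.length - 1) (by omega)]
    rw [PySem.Int.mod_eq_emod_of_pos pvMOD_pos, PySem.Int.mod_eq_emod_of_pos pvMOD_pos]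
    have h2 : wl.length - 1 + 1 = wl.length := by omega
    simp only [zero_mul, Int.zero_emod, sub_zero, h2, List.take_length, List.drop_zero,
      Int.toNat_zero, pvH_mod_self]
  · have hs1 : 1 ≤ s := by omega
    have hst : 1 ≤ s.toNat := by omega
    set P := pvH 0 (wl.take s.toNat) with hP
    set S := pvH 0 (wl.drop s.toNat) with hS
    simp only [pvGetA]
    rw [if_pos (by omega)]
    have h1 : ((wl.length : Int) - 1) = ((wl.length - 1 : Nat) : Int) := by omega
    have h2 : (s - 1) = ((s.toNat - 1 : Nat) : Int) := by omega
    rw [h1, pvArr_getD wl (wl.length - 1) (by omega)]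
    rw [h2, pvArr_getD wl (s.toNat - 1) (by omega)]
    have h3 : wl.length - 1 + 1 = wl.length := by omega
    have h4 : s.toNat - 1 + 1 = s.toNat := by omega
    rw [h3, h4, List.take_length, ← hP]
    have hexp : (((wl.length - 1 : Nat) : Int) - s + 1).toNat = (wl.drop s.toNat).length := by
      simp [List.length_drop]; omega
    rw [PySem.Int.powMod_eq, hexp]
    rw [PySem.Int.mod_eq_emod_of_pos pvMOD_pos, PySem.Int.mod_eq_emod_of_pos pvMOD_pos,
      PySem.Int.mod_eq_emod_of_pos pvMOD_pos]
    have hsplit : pvH 0 wl = pvH P (wl.drop s.toNat) := by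
      rw [hP]; simp only [pvH]; rw [← List.foldl_append, List.take_append_drop]
    have hme : pvH 0 wl ≡ P * 26 ^ (wl.drop s.toNat).length + S [ZMOD pvMOD] := by
      rw [hsplit]; exact pvH_modeq _ _
    have hsub : pvH 0 wl - P * (26 ^ (wl.drop s.toNat).length % pvMOD) % pvMOD ≡ S [ZMOD pvMOD] := by
      have hpow : (P * (26 ^ (wl.drop s.toNat).length % pvMOD) % pvMOD : Int)
          ≡ P * 26 ^ (wl.drop s.toNat).length [ZMOD pvMOD] := by
        calc (P * (26 ^ (wl.drop s.toNat).length % pvMOD) % pvMOD : Int)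
            ≡ P * (26 ^ (wl.drop s.toNat).length % pvMOD) [ZMOD pvMOD] :=
              show _ % _ = _ % _ from Int.emod_emod_of_dvd _ dvd_rfl
          _ ≡ P * 26 ^ (wl.drop s.toNat).length [ZMOD pvMOD] :=
              Int.ModEq.mul_left P (show ((26:Int) ^ (wl.drop s.toNat).length % pvMOD) ≡ _ [ZMOD pvMOD] from
                Int.emod_emod_of_dvd _ dvd_rfl)
      have := hme.sub hpow
      simpa using this
    calc (pvH 0 wl - P * (26 ^ (wl.drop s.toNat).length % pvMOD) % pvMOD) % pvMOD
        = S % pvMOD := hsub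
      _ = S := pvH_mod_self _

theorem pvHashB_eq (l : List Char) : pvHashB l = pvH 0 l := rfl

-- the two loops agree under the invariant i = step * k, count = step
theorem pvLoop_eq (wl : List Char) (k : Int) (hk : 0 ≤ k) :
    ∀ (fuel : Nat) (step i : Int), 0 ≤ step → i = step * k →
      pvLoopA (pvPref 0 wl) (wl.length : Int) k fuel i step =
      pvLoopB wl (wl.length : Int) k fuel step := by
  intro fuel
  induction fuel with
  | zero => intro step i _ _; rfl
  | succ fuel ih =>
    intro step i hstep hi
    have he : (step + 1) * k = i + k := by rw [hi]; ring
    show (if i + k < (wl.length : Int) then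
            if pvGetA (pvPref 0 wl) 0 ((wl.length : Int) - (i + k) - 1) =
                pvGetA (pvPref 0 wl) (i + k) ((wl.length : Int) - 1) then step + 1
            else pvLoopA (pvPref 0 wl) (wl.length : Int) k fuel (i + k) (step + 1)
          else step + 1) =
         (if (wl.length : Int) ≤ (step + 1) * k then step + 1
          else if pvHashB (PySem.List.slice wl none (some ((wl.length : Int) - (step + 1) * k))) =
                  pvHashB (PySem.List.slice wl (some ((step + 1) * k)) none) then step + 1
               else pvLoopB wl (wl.length : Int) k fuel (step + 1))
    rw [he]
    by_cases hc : i + k < (wl.length : Int)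
    · rw [if_pos hc, if_neg (show ¬((wl.length : Int) ≤ i + k) by omega)]
      have hs0 : 0 ≤ i + k := by rw [← he]; exact mul_nonneg (by omega) hk
      have hpre : pvGetA (pvPref 0 wl) 0 ((wl.length : Int) - (i + k) - 1) =
          pvHashB (PySem.List.slice wl none (some ((wl.length : Int) - (i + k)))) := by
        rw [pvGetA_prefix wl _ (by omega) (by omega), pvHashB_eq,
          PySem.List.slice_to wl (by omega : (0:Int) ≤ (wl.length : Int) - (i + k))]
        have h5 : ((wl.length : Int) - (i + k) - 1).toNat + 1 = ((wl.length : Int) - (i + k)).toNat := by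
          omega
        rw [h5]
      have hsuf : pvGetA (pvPref 0 wl) (i + k) ((wl.length : Int) - 1) =
          pvHashB (PySem.List.slice wl (some (i + k)) none) := by
        rw [pvGetA_suffix wl (i + k) hs0 hc, pvHashB_eq, PySem.List.slice_from wl hs0]
      rw [hpre, hsuf]
      by_cases heq : pvHashB (PySem.List.slice wl none (some ((wl.length : Int) - (i + k)))) =
          pvHashB (PySem.List.slice wl (some (i + k)) none)
      · rw [if_pos heq, if_pos heq]
      · rw [if_neg heq, if_neg heq]
        exact ih (step + 1) (i + k) (by omega) he.symm
    · rw [if_neg hc, if_pos (show (wl.length : Int) ≤ i + k by omega)]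

-- ===== VERDICT (by name: the statement is the Claim_ definition above) =====
theorem minimumTimeToInitialState_spec : Claim_equal_minimumTimeToInitialState := by
  intro word k _ hk
  unfold Spec_minimumTimeToInitialState
  show pvLoopA ((pvBuildA word.toList 0 []).2) (PySem.Str.len word) k (word.toList.length + 1) 0 0 =
    pvLoopB word.toList (PySem.Str.len word) k (word.toList.length + 1) 0
  rw [PySem.Str.len_eq, pvBuildA_snd, List.nil_append]
  exact pvLoop_eq word.toList k hk (word.toList.length + 1) 0 0 le_rfl (by ring)
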